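-- pv_equiv track=rewrite | github.com/Eeun-ju/Algorithm-Study | PRO/WeeklyChallenge/1주차.py | solution
-- ===== SOURCE A (Python) =====
-- def solution(price, money, count):
--     for c in range(1,count+1):
--         money -= price*c
--
--     if money >=0:
--         return 0
--     else:
--         answer = (-1)*money
--         return answer
-- ===== SOURCE B (Python) =====
-- def solution(price, money, count):
--     n = count if count > 0 else 0
--     total = price * n * (n + 1) // 2
--     need = total - money
--     return need if need > 0 else 0
-- ===== Notes on version B (the rewrite author's own statement) =====
-- stated objective: faster
-- what changed: Replaced the O(count) loop subtracting price*c for each ride with the closed-form arithmetic series price*n*(n+1)//2 and a single max-with-0 comparison.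
import Mathlib
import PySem

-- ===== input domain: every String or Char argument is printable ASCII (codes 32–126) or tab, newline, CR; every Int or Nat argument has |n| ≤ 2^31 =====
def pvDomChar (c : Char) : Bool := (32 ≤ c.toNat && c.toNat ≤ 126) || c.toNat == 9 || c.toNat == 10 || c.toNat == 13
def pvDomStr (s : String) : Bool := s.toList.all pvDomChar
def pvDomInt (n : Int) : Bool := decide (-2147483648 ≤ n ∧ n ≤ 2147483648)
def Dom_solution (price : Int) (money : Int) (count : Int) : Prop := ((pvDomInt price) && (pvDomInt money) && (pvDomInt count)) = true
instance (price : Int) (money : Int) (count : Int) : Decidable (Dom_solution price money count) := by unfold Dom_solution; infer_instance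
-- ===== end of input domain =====

-- B replaces A's O(count) subtraction loop by the closed-form series price*n*(n+1)//2 (objective: faster).

-- ===== PORT A =====
def solution (price : Int) (money : Int) (count : Int) : Int :=
  let money := (PySem.List.pyRange 1 (count + 1) 1).foldl (fun m c => m - price * c) money
  if money ≥ 0 then 0 else (-1) * money

-- ===== PORT B =====
def solution_alt (price : Int) (money : Int) (count : Int) : Int :=
  let n := if count > 0 then count else 0
  let total := PySem.Int.floordiv (price * n * (n + 1)) 2
  let need := total - money
  if need > 0 then need else 0

-- ===== PRECONDITION & SPEC =====
def Spec_solution (price : Int) (money : Int) (count : Int) (out : Int) : Prop := out = solution_alt price money count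
instance (price : Int) (money : Int) (count : Int) (out : Int) : Decidable (Spec_solution price money count out) := by unfold Spec_solution; infer_instance

-- ===== CLAIM (what is proved, stated in full; the proofs are below) =====
def Claim_equal_solution : Prop := ∀ (price : Int) (money : Int) (count : Int), Dom_solution price money count → Spec_solution price money count (solution price money count)

-- ===== LEMMAS AND PROOFS =====

-- A's loop only subtracts: its result is the start minus price times the sum of the range.
theorem foldl_sub_eq (price : Int) (l : List Int) (m : Int) :
    l.foldl (fun m c => m - price * c) m = m - price * l.sum := by
  induction l generalizing m with
  | nil => simp
  | cons x xs ih => simp [List.foldl, ih, List.sum_cons]; ring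

theorem two_mul_sum_range (N : ℕ) :
    2 * ((List.range N).map (fun k : ℕ => (1 : Int) + (k : Int))).sum = (N : Int) * ((N : Int) + 1) := by
  induction N with
  | zero => simp
  | succ n ih =>
    rw [List.range_succ, List.map_append, List.sum_append]
    simp only [List.map_cons, List.map_nil, List.sum_cons, List.sum_nil]
    push_cast
    linarith

-- n*(n+1) is twice the sum of A's range, where n = max(count, 0).
theorem series_eq (count : Int) :
    (if count > 0 then count else 0) * ((if count > 0 then count else 0) + 1)
      = 2 * (PySem.List.pyRange 1 (count + 1) 1).sum := by
  rw [PySem.List.pyRange_one]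
  by_cases h : count > 0
  · simp only [if_pos h]
    have hN : (((count + 1 - 1).toNat : ℕ) : Int) = count := by omega
    have h2 := two_mul_sum_range (count + 1 - 1).toNat
    rw [hN] at h2
    omega
  · simp only [if_neg h]
    have h0 : (count + 1 - 1).toNat = 0 := by omega
    rw [h0]
    simp

-- ===== VERDICT (by name: the statement is the Claim_ definition above) =====
theorem solution_spec : Claim_equal_solution := by
  intro price money count _
  unfold Spec_solution solution solution_alt
  rw [foldl_sub_eq]
  have hs := series_eq count
  set n := (if count > 0 then count else 0) with hn
  set S := (PySem.List.pyRange 1 (count + 1) 1).sum with hS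
  have htot : PySem.Int.floordiv (price * n * (n + 1)) 2 = price * S := by
    have : price * n * (n + 1) = 2 * (price * S) := by rw [mul_assoc, hs]; ring
    rw [this]
    show Int.fdiv (2 * (price * S)) 2 = price * S
    rw [Int.mul_fdiv_cancel_left _ (by norm_num)]
  simp only [htot]
  split_ifs with h1 h2 h2 <;> omega
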